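-- pv_equiv track=rewrite | github.com/mooware/trophytroopa | trophytroopa_web.py | markdown_format_code
-- ===== SOURCE A (Python) =====
-- def markdown_format_code(text):
--     """Turn the given text into a markdown inline code block."""
--     filtered = ''
--     for c in text:
--         if c == '`':
--             filtered += "'"
--         elif c >= ' ':
--             filtered += c
--     return '`' + filtered + '`'
-- ===== SOURCE B (Python) =====
-- def markdown_format_code(text):
--     """Turn the given text into a markdown inline code block."""
--     body = "'".join(text.split('`'))
--     printable = ''.join(c for c in body if c >= ' ')
--     return '`' + printable + '`'
-- ===== Notes on version B (the rewrite author's own statement) =====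
-- stated objective: idiomatic
-- what changed: Replaces A's single accumulating loop with if/elif per character by two staged whole-string passes: split on backtick and rejoin with an apostrophe, then a filter keeping only characters >= space.
import Mathlib
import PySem

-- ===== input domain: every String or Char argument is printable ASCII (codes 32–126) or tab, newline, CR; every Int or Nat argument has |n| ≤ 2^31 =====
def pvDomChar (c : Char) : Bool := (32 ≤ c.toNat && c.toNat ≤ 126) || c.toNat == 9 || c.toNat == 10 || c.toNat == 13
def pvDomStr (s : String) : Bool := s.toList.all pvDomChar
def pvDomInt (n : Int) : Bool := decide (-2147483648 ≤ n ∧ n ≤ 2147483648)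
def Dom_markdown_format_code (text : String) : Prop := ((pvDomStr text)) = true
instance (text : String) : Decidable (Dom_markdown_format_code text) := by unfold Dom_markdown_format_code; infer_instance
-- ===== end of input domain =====

-- B replaces A's per-character if/elif accumulation loop with two staged whole-string passes: split on backtick / rejoin with apostrophe, then a filter keeping chars >= ' ' (idiomatic; same O(n) cost).

-- ===== PORT A =====
-- A: accumulate filtered chars one by one: backtick -> apostrophe, chars >= ' ' kept, rest dropped.
def markdown_format_code (text : String) : String :=
  let filtered := text.toList.foldl
    (fun acc c =>
      if c = '`' then acc ++ ['\'']
      else if ' ' ≤ c then acc ++ [c]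
      else acc) ([] : List Char)
  String.ofList (('`' :: filtered) ++ ['`'])

-- ===== PORT B =====
-- B: body = "'".join(text.split('`')); printable = ''.join(c for c in body if c >= ' '); '`' + printable + '`'.
def markdown_format_code_alt (text : String) : String :=
  let body := PySem.Chars.join ['\''] (PySem.Chars.splitOn text.toList ['`'])
  let printable := body.filter (fun c => decide (' ' ≤ c))
  String.ofList (('`' :: printable) ++ ['`'])

-- ===== PRECONDITION & SPEC =====
def Spec_markdown_format_code (text : String) (out : String) : Prop := out = markdown_format_code_alt text
instance (text : String) (out : String) : Decidable (Spec_markdown_format_code text out) := by unfold Spec_markdown_format_code; infer_instance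

-- ===== CLAIM (what is proved, stated in full; the proofs are below) =====
def Claim_equal_markdown_format_code : Prop := ∀ (text : String), Dom_markdown_format_code text → Spec_markdown_format_code text (markdown_format_code text)

-- ===== LEMMAS AND PROOFS =====

-- the character map both programs implement: backtick -> apostrophe, else identity
def pvR (c : Char) : Char := if c = '`' then '\'' else c

-- specification of splitOn on a single-char separator, as a plain structural recursion
def pvSplit (pre : List Char) : List Char → List (List Char)
  | [] => [pre]
  | c :: rest => if c = '`' then pre :: pvSplit [] rest else pvSplit (pre ++ [c]) rest

lemma pvSplit_ne_nil (pre l : List Char) : pvSplit pre l ≠ [] := by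
  induction l generalizing pre with
  | nil => simp [pvSplit]
  | cons c rest ih =>
    simp only [pvSplit]
    split_ifs
    · simp
    · exact ih _

lemma pv_go_eq (l : List Char) : ∀ (fuel : Nat) (cur : List Char) (acc : List (List Char)),
    l.length ≤ fuel →
    PySem.Chars.splitOn.go ['`'] fuel l cur acc = acc.reverse ++ pvSplit cur.reverse l := by
  induction l with
  | nil =>
    intro fuel cur acc _
    cases fuel <;> simp [PySem.Chars.splitOn.go, pvSplit]
  | cons c rest ih =>
    intro fuel cur acc h
    cases fuel with
    | zero => simp at h
    | succ f =>
      simp only [PySem.Chars.splitOn.go, List.isPrefixOf, Bool.and_true, beq_iff_eq]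
      by_cases hc : '`' = c
      · subst hc
        simp only [if_true, List.length_cons, List.length_nil, List.drop_succ_cons, List.drop_zero]
        rw [ih f [] (cur.reverse :: acc) (by simpa using Nat.le_of_succ_le_succ h)]
        simp [pvSplit]
      · rw [if_neg hc]
        rw [ih f (c :: cur) acc (Nat.le_of_succ_le_succ h)]
        simp only [pvSplit]
        rw [if_neg (fun h' => hc h'.symm)]
        simp

lemma pv_join_pvSplit (l : List Char) : ∀ pre : List Char,
    PySem.Chars.join ['\''] (pvSplit pre l) = pre ++ l.map pvR := by
  induction l with
  | nil => intro pre; simp [pvSplit, PySem.Chars.join_singleton]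
  | cons c rest ih =>
    intro pre
    simp only [pvSplit, List.map_cons]
    by_cases hc : c = '`'
    · rw [if_pos hc]
      rcases hsp : pvSplit [] rest with _ | ⟨p, ps⟩
      · exact absurd hsp (pvSplit_ne_nil [] rest)
      · rw [PySem.Chars.join_cons_cons]
        rw [← hsp, ih []]
        simp [pvR, hc]
    · rw [if_neg hc, ih (pre ++ [c])]
      simp [pvR, hc]

lemma pv_split_join (cs : List Char) :
    PySem.Chars.join ['\''] (PySem.Chars.splitOn cs ['`']) = cs.map pvR := by
  unfold PySem.Chars.splitOn
  rw [pv_go_eq cs (cs.length + 1) [] [] (Nat.le_succ _)]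
  simpa using pv_join_pvSplit cs []

lemma pv_step_eq :
    (fun (acc : List Char) (c : Char) =>
      if c = '`' then acc ++ ['\''] else if ' ' ≤ c then acc ++ [c] else acc) =
    (fun (acc : List Char) (c : Char) => if ' ' ≤ pvR c then acc ++ [pvR c] else acc) := by
  funext acc c
  by_cases hc : c = '`'
  · subst hc; simp [pvR]
  · simp [pvR, hc]

-- ===== VERDICT (by name: the statement is the Claim_ definition above) =====
theorem markdown_format_code_spec : Claim_equal_markdown_format_code := by
  intro text _
  unfold Spec_markdown_format_code markdown_format_code markdown_format_code_alt
  rw [pv_step_eq, PySem.List.foldl_append_ite, pv_split_join]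
  simp only [List.filter_map, List.nil_append]
  rfl
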